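-- pv_equiv track=rewrite | github.com/Jew-Yeah/hierarchical_mmm_bayesian | core/preprocessing.py | _channel_name_from_filename
-- ===== SOURCE A (Python) =====
-- def _channel_name_from_filename(filename: str, kind: str) -> str:
--     """
--     Makes a stable short channel name from a file name.
--     Examples:
--       "StatisticAdvertising - Context_weekly.csv" -> "context"
--       "StatisticAdvertising - Car_weekly.csv" -> "car"
--     """
--     name = filename
--     name = name.replace(".csv", "")
--     name = name.replace("_weekly", "")
--     name = name.replace("StatisticAdvertising - ", "")
--     name = name.strip()
--
--     # slugify-ish
--     out = []
--     for ch in name.lower():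
--         if ch.isalnum():
--             out.append(ch)
--         elif ch in [" ", "-", "_"]:
--             out.append("_")
--     slug = "".join(out).strip("_")
--     while "__" in slug:
--         slug = slug.replace("__", "_")
--
--     # add prefix for safety if needed
--     if not slug:
--         slug = f"{kind}_channel"
--     return slug
-- ===== SOURCE B (Python) =====
-- def _channel_name_from_filename(filename: str, kind: str) -> str:
--     name = (filename.replace(".csv", "")
--                     .replace("_weekly", "")
--                     .replace("StatisticAdvertising - ", "")
--                     .strip())
--     # single pass: collect maximal alphanumeric runs, separators end a run,
--     # any other character is simply skipped
--     parts = []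
--     cur = []
--     for ch in name.lower():
--         if ch.isalnum():
--             cur.append(ch)
--         elif ch in " -_":
--             if cur:
--                 parts.append("".join(cur))
--                 cur = []
--     if cur:
--         parts.append("".join(cur))
--     slug = "_".join(parts)
--     return slug or f"{kind}_channel"
-- ===== Notes on version B (the rewrite author's own statement) =====
-- stated objective: simpler
-- what changed: B is a single-pass state machine that collects maximal alphanumeric runs into a parts list (a separator flushes the current run, other characters are skipped) and joins them with '_', so the intermediate underscore string, strip('_') and the repeated whole-string '__'->'_' replacement loop of A disappear entirely.
import Mathlib
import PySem

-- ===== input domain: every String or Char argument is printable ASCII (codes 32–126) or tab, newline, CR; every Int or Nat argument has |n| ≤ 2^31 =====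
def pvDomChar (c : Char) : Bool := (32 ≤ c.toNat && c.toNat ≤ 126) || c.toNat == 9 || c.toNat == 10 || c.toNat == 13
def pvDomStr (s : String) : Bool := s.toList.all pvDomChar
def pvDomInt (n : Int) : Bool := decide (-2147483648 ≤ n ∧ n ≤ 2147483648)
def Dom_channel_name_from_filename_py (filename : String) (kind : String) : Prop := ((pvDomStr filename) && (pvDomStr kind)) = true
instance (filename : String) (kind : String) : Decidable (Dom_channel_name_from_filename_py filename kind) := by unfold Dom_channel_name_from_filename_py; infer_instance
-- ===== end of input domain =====

-- B replaces A's map-everything / strip('_') / repeated '__'→'_' replacement pipeline by one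
-- pass that collects maximal alphanumeric runs and joins them (objective: simpler);
-- return values proved equal on all inputs.

-- ===== PORT A =====
-- One left-to-right pass of slug.replace("__", "_") (helper used to prove the
-- while-loop of A terminates; cited by pvLoopA's decreasing_by).
def pvRep1 : List Char → List Char
  | [] => []
  | [c] => [c]
  | c :: c' :: t => if c = '_' ∧ c' = '_' then '_' :: pvRep1 t else c :: pvRep1 (c' :: t)

-- Boolean "contains two adjacent underscores".
def pvHas2 : List Char → Bool
  | c :: c' :: t => (decide (c = '_') && decide (c' = '_')) || pvHas2 (c' :: t)
  | _ => false

theorem pvRep1_length_le (s : List Char) : (pvRep1 s).length ≤ s.length := by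
  induction s using pvRep1.induct with
  | case1 => simp [pvRep1]
  | case2 c => simp [pvRep1]
  | case3 c c' t h ih => simp [pvRep1, h]; omega
  | case4 c c' t h ih => simp [pvRep1, h] at ih ⊢; omega

theorem pvRep1_length_lt (s : List Char) (h : pvHas2 s = true) :
    (pvRep1 s).length < s.length := by
  induction s using pvRep1.induct with
  | case1 => simp [pvHas2] at h
  | case2 c => simp [pvHas2] at h
  | case3 c c' t h2 ih =>
      simp [pvRep1, h2]
      have := pvRep1_length_le t; omega
  | case4 c c' t h2 ih =>
      simp [pvHas2] at h
      rcases h with h | h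
      · exact absurd (by tauto) h2
      · simp [pvRep1, h2]; have := ih h; simpa using this

theorem pvReplace_go_eq (fuel : Nat) : ∀ (l acc : List Char), l.length ≤ fuel →
    PySem.Chars.replace.go ['_','_'] ['_'] fuel l acc = acc.reverse ++ pvRep1 l := by
  induction fuel with
  | zero =>
      intro l acc h
      have : l = [] := by cases l <;> simp_all
      subst this; simp [PySem.Chars.replace.go, pvRep1]
  | succ f ih =>
      intro l acc h
      match l with
      | [] => simp [PySem.Chars.replace.go, pvRep1]
      | [c] =>
          have hpre : List.isPrefixOf ['_','_'] [c] = false := by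
            simp [List.isPrefixOf]
          simp [PySem.Chars.replace.go, hpre, pvRep1]
          rw [ih [] (c :: acc) (by simp)]
          simp [pvRep1]
      | c :: c' :: t =>
          by_cases hu : c = '_' ∧ c' = '_'
          · obtain ⟨rfl, rfl⟩ := hu
            have hpre : List.isPrefixOf ['_','_'] ('_'::'_'::t) = true := by
              simp [List.isPrefixOf]
            simp only [PySem.Chars.replace.go, hpre, if_true, List.length_cons, List.drop_succ_cons, List.drop_zero, List.length_nil, List.drop, List.reverse_cons, List.reverse_nil, List.nil_append]
            rw [show (['_'] ++ acc : List Char) = '_' :: acc from rfl, ih t ('_' :: acc) (by simp at h ⊢; omega)]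
            simp [pvRep1]
          · have hpre : List.isPrefixOf ['_','_'] (c::c'::t) = false := by
              simp [List.isPrefixOf]; tauto
            simp only [PySem.Chars.replace.go, hpre]
            rw [ih (c'::t) (c :: acc) (by simp at h ⊢; omega)]
            simp [pvRep1, hu]

theorem pvReplace_eq_rep1 (s : List Char) :
    PySem.Chars.replace s ['_','_'] ['_'] = pvRep1 s := by
  simp [PySem.Chars.replace]
  rw [pvReplace_go_eq s.length s [] le_rfl]
  simp

theorem pvInfix_iff_has2 (s : List Char) : ['_','_'] <:+: s ↔ pvHas2 s = true := by
  induction s with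
  | nil => simp [pvHas2]
  | cons c t ih =>
      rw [List.infix_cons_iff]
      cases t with
      | nil => simp [pvHas2, List.IsPrefix]
      | cons c' u =>
          constructor
          · rintro (hp | hi)
            · obtain ⟨r, hr⟩ := hp
              simp at hr
              simp [pvHas2, ← hr.1, ← hr.2.1]
            · simp [pvHas2, ih.mp hi]
          · intro h
            simp [pvHas2] at h
            rcases h with ⟨h1, h2⟩ | h
            · exact Or.inl ⟨u, by simp [h1, h2]⟩
            · exact Or.inr (ih.mpr (by simp [pvHas2, h]))

theorem pvLoop_shrink (s : List Char) (h : PySem.Chars.isIn ['_','_'] s = true) :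
    (PySem.Chars.replace s ['_','_'] ['_']).length < s.length := by
  rw [pvReplace_eq_rep1]
  exact pvRep1_length_lt s ((pvInfix_iff_has2 s).mp ((PySem.Chars.isIn_iff_infix _ _).mp h))

-- while "__" in slug: slug = slug.replace("__", "_")
def pvLoopA (s : List Char) : List Char :=
  if h : PySem.Chars.isIn ['_','_'] s = true then pvLoopA (PySem.Chars.replace s ['_','_'] ['_']) else s
termination_by s.length
decreasing_by exact pvLoop_shrink s h

def channel_name_from_filename_py (filename : String) (kind : String) : String :=
  let name := PySem.Str.replace filename ".csv" ""
  let name := PySem.Str.replace name "_weekly" ""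
  let name := PySem.Str.replace name "StatisticAdvertising - " ""
  let name := PySem.Str.strip name
  -- for ch in name.lower(): append ch / '_' / nothing   (ch in [" ", "-", "_"] is
  -- membership of 1-char strings, ported as Char-list membership)
  let out : List Char := (PySem.Str.lower name).toList.foldl
    (fun acc ch =>
      if PySem.Chars.isalnum ch then acc ++ [ch]
      else if [' ', '-', '_'].contains ch then acc ++ ['_'] else acc) []
  let slug := PySem.Chars.stripChars out ['_']
  let slug := pvLoopA slug
  if slug = [] then kind ++ "_channel" else String.mk slug

-- ===== PORT B =====
-- one step of B's loop body: extend the current alnum run, or flush it on a separator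
def pvStepB (st : List (List Char) × List Char) (ch : Char) : List (List Char) × List Char :=
  if PySem.Chars.isalnum ch then (st.1, st.2 ++ [ch])
  else if PySem.Chars.isIn [ch] [' ', '-', '_'] then   -- ch in " -_"
    (if st.2 ≠ [] then (st.1 ++ [st.2], ([] : List Char)) else st)
  else st

def channel_name_from_filename_py_alt (filename : String) (kind : String) : String :=
  let name := PySem.Str.replace filename ".csv" ""
  let name := PySem.Str.replace name "_weekly" ""
  let name := PySem.Str.replace name "StatisticAdvertising - " ""
  let name := PySem.Str.strip name
  let st := (PySem.Str.lower name).toList.foldl pvStepB ([], [])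
  let parts := if st.2 ≠ [] then st.1 ++ [st.2] else st.1   -- if cur: parts.append(...)
  let slug := PySem.Chars.join ['_'] parts                  -- '_'.join(parts)
  if slug = [] then kind ++ "_channel" else String.mk slug

-- ===== PRECONDITION & SPEC =====
def Spec_channel_name_from_filename_py (filename : String) (kind : String) (out : String) : Prop := out = channel_name_from_filename_py_alt filename kind
instance (filename : String) (kind : String) (out : String) : Decidable (Spec_channel_name_from_filename_py filename kind out) := by unfold Spec_channel_name_from_filename_py; infer_instance

-- ===== CLAIM (what is proved, stated in full; the proofs are below) =====
def Claim_equal_channel_name_from_filename_py : Prop := ∀ (filename : String) (kind : String), Dom_channel_name_from_filename_py filename kind → Spec_channel_name_from_filename_py filename kind (channel_name_from_filename_py filename kind)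

-- ===== LEMMAS AND PROOFS =====

-- collapse every run of underscores to a single one (leading/trailing kept)
def pvDd1 : List Char → List Char
  | [] => []
  | [c] => [c]
  | c :: c' :: t => if c = '_' ∧ c' = '_' then pvDd1 ('_' :: t) else c :: pvDd1 (c' :: t)
termination_by s => s.length

-- structural spec of split on a single '_'
def pvSp : List Char → List (List Char)
  | [] => [[]]
  | c :: t => if c = '_' then [] :: pvSp t else (pvSp t).modifyHead (c :: ·)

-- the canonical normal form: drop boundary underscores, collapse runs
mutual
def pvNorm : List Char → List Char
  | [] => []
  | c :: t => if c = '_' then pvNorm t else c :: pvNormIn t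
def pvNormIn : List Char → List Char
  | [] => []
  | c :: t => if c = '_' then (if pvNorm t = [] then [] else '_' :: pvNorm t) else c :: pvNormIn t
end

theorem pvDd1_cons_ne (c : Char) (hc : c ≠ '_') (x : List Char) :
    pvDd1 (c :: x) = c :: pvDd1 x := by
  cases x with
  | nil => simp [pvDd1]
  | cons y ys => simp [pvDd1, hc]

theorem pvDd1_rep1 (s : List Char) :
    pvDd1 (pvRep1 s) = pvDd1 s ∧ pvDd1 ('_' :: pvRep1 s) = pvDd1 ('_' :: s) := by
  suffices h : ∀ n (s : List Char), s.length ≤ n →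
      pvDd1 (pvRep1 s) = pvDd1 s ∧ pvDd1 ('_' :: pvRep1 s) = pvDd1 ('_' :: s) from
    h s.length s le_rfl
  intro n
  induction n with
  | zero =>
      intro s hs
      have : s = [] := by cases s <;> simp_all
      subst this; simp [pvRep1]
  | succ n ih =>
      intro s hs
      match s with
      | [] => simp [pvRep1]
      | [c] => simp [pvRep1]
      | c :: c' :: t =>
          by_cases hu : c = '_' ∧ c' = '_'
          · obtain ⟨rfl, rfl⟩ := hu
            have ht : t.length ≤ n := by simp at hs; omega
            have iht := ih t ht
            constructor
            · rw [show pvRep1 ('_'::'_'::t) = '_' :: pvRep1 t by simp [pvRep1]]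
              rw [iht.2]
              rw [show pvDd1 ('_'::'_'::t) = pvDd1 ('_'::t) by simp [pvDd1]]
            · rw [show pvRep1 ('_'::'_'::t) = '_' :: pvRep1 t by simp [pvRep1]]
              rw [show pvDd1 ('_'::'_'::pvRep1 t) = pvDd1 ('_'::pvRep1 t) by simp [pvDd1]]
              rw [iht.2]
              rw [show pvDd1 ('_'::'_'::'_'::t) = pvDd1 ('_'::'_'::t) by simp [pvDd1]]
              rw [show pvDd1 ('_'::'_'::t) = pvDd1 ('_'::t) by simp [pvDd1]]
          · have hr : pvRep1 (c::c'::t) = c :: pvRep1 (c'::t) := by simp [pvRep1, hu]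
            have ht : (c'::t).length ≤ n := by simp at hs ⊢; omega
            have iht := ih (c'::t) ht
            by_cases hc : c = '_'
            · subst hc
              have hc' : c' ≠ '_' := by tauto
              constructor
              · rw [hr, iht.2]
              · rw [hr]
                rw [show pvDd1 ('_'::'_'::pvRep1 (c'::t)) = pvDd1 ('_'::pvRep1 (c'::t)) by simp [pvDd1]]
                rw [iht.2]
                rw [show pvDd1 ('_'::'_'::c'::t) = pvDd1 ('_'::c'::t) by simp [pvDd1]]
            · constructor
              · rw [hr, pvDd1_cons_ne c hc, pvDd1_cons_ne c hc, iht.1]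
              · rw [hr]
                rw [show pvDd1 ('_'::c::pvRep1 (c'::t)) = '_' :: pvDd1 (c::pvRep1 (c'::t)) by simp [pvDd1, hc]]
                rw [show pvDd1 ('_'::c::c'::t) = '_' :: pvDd1 (c::c'::t) by simp [pvDd1, hc]]
                rw [pvDd1_cons_ne c hc, pvDd1_cons_ne c hc, iht.1]

theorem pvDd1_of_no2 (s : List Char) (h : pvHas2 s = false) : pvDd1 s = s := by
  induction s using pvDd1.induct with
  | case1 => simp [pvDd1]
  | case2 c => simp [pvDd1]
  | case3 c c' t hu ih =>
      obtain ⟨rfl, rfl⟩ := hu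
      rw [show pvHas2 ('_'::'_'::t) = ((decide (('_':Char) = '_') && decide (('_':Char) = '_')) || pvHas2 ('_'::t)) from rfl] at h
      simp at h
  | case4 c c' t hu ih =>
      rw [show pvDd1 (c::c'::t) = c :: pvDd1 (c'::t) by simp [pvDd1, hu]]
      rw [ih (by rw [show pvHas2 (c::c'::t) = ((decide (c = '_') && decide (c' = '_')) || pvHas2 (c'::t)) from rfl] at h; simp at h; tauto)]

theorem pvLoopA_eq_dd1 (s : List Char) : pvLoopA s = pvDd1 s := by
  induction s using pvLoopA.induct with
  | case1 s h ih =>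
      rw [pvLoopA, dif_pos h, ih, pvReplace_eq_rep1, (pvDd1_rep1 s).1]
  | case2 s h =>
      rw [pvLoopA, dif_neg h]
      have : pvHas2 s = false := by
        rw [← Bool.not_eq_true]
        intro hc
        exact h ((PySem.Chars.isIn_iff_infix _ _).mpr ((pvInfix_iff_has2 s).mpr hc))
      rw [pvDd1_of_no2 s this]

theorem pvSp_ne_nil (s : List Char) : pvSp s ≠ [] := by
  cases s with
  | nil => simp [pvSp]
  | cons c t =>
      simp only [pvSp]
      split
      · simp
      · have := pvSp_ne_nil t
        cases h : pvSp t with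
        | nil => exact absurd h this
        | cons a l => simp [h]

theorem pvJoin_cons (p : List Char) (ps : List (List Char)) :
    PySem.Chars.join ['_'] (p :: ps)
      = p ++ (if ps = [] then [] else '_' :: PySem.Chars.join ['_'] ps) := by
  cases ps with
  | nil => simp [PySem.Chars.join, List.intercalate]
  | cons q qs => simp [PySem.Chars.join, List.intercalate, List.intersperse]

theorem pvJoin_filter_nil_iff (ps : List (List Char)) :
    PySem.Chars.join ['_'] (ps.filter (fun p => !p.isEmpty)) = []
      ↔ ps.filter (fun p => !p.isEmpty) = [] := by
  cases hf : ps.filter (fun p => !p.isEmpty) with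
  | nil => simp [PySem.Chars.join, List.intercalate]
  | cons a l =>
      have ha : a ∈ ps.filter (fun p => !p.isEmpty) := by rw [hf]; simp
      have : a ≠ [] := by
        have := (List.mem_filter.mp ha).2
        simpa using this
      rw [pvJoin_cons]
      constructor
      · intro h
        exact absurd (List.append_eq_nil_iff.mp h).1 this
      · intro h; exact absurd h (by simp)

theorem pvG_eq_norm (s : List Char) :
    PySem.Chars.join ['_'] ((pvSp s).filter (fun p => !p.isEmpty)) = pvNorm s := by
  suffices h : ∀ n (s : List Char), s.length ≤ n →
      (PySem.Chars.join ['_'] ((pvSp s).filter (fun p => !p.isEmpty)) = pvNorm s) ∧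
      (∀ hh tl, pvSp s = hh :: tl →
        hh ++ (if tl.filter (fun p => !p.isEmpty) = [] then []
               else '_' :: PySem.Chars.join ['_'] (tl.filter (fun p => !p.isEmpty)))
          = pvNormIn s) from (h s.length s le_rfl).1
  intro n
  induction n with
  | zero =>
      intro s hs
      have : s = [] := by cases s <;> simp_all
      subst this
      refine ⟨by simp [pvSp, pvNorm, PySem.Chars.join, List.intercalate], ?_⟩
      intro hh tl hsp
      simp [pvSp] at hsp
      obtain ⟨rfl, rfl⟩ := hsp
      simp [pvNormIn, PySem.Chars.join, List.intercalate]
  | succ n ih =>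
      intro s hs
      match s with
      | [] =>
          refine ⟨by simp [pvSp, pvNorm, PySem.Chars.join, List.intercalate], ?_⟩
          intro hh tl hsp
          simp [pvSp] at hsp
          obtain ⟨rfl, rfl⟩ := hsp
          simp [pvNormIn, PySem.Chars.join, List.intercalate]
      | c :: u =>
          have hu : u.length ≤ n := by simp at hs; omega
          have ihu := ih u hu
          by_cases hc : c = '_'
          · subst hc
            constructor
            · rw [show pvSp ('_'::u) = [] :: pvSp u by simp [pvSp]]
              rw [show (([] :: pvSp u).filter (fun p => !p.isEmpty)) = (pvSp u).filter (fun p => !p.isEmpty) by simp]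
              rw [ihu.1]
              simp [pvNorm]
            · intro hh tl hsp
              rw [show pvSp ('_'::u) = [] :: pvSp u by simp [pvSp]] at hsp
              obtain ⟨rfl, rfl⟩ : hh = [] ∧ tl = pvSp u := by
                cases hsp; exact ⟨rfl, rfl⟩
              rw [show pvNormIn ('_'::u) = (if pvNorm u = [] then [] else '_' :: pvNorm u) by simp [pvNormIn]]
              rw [← ihu.1]
              by_cases hf : (pvSp u).filter (fun p => !p.isEmpty) = []
              · simp [hf, (pvJoin_filter_nil_iff (pvSp u)).mpr hf]
              · have : ¬ (PySem.Chars.join ['_'] ((pvSp u).filter (fun p => !p.isEmpty)) = []) := by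
                  rw [pvJoin_filter_nil_iff]; exact hf
                simp [hf, this]
          · obtain ⟨hh', tl', hsp'⟩ : ∃ hh' tl', pvSp u = hh' :: tl' := by
              cases hsp : pvSp u with
              | nil => exact absurd hsp (pvSp_ne_nil u)
              | cons a l => exact ⟨a, l, rfl⟩
            have hspc : pvSp (c::u) = (c :: hh') :: tl' := by
              simp [pvSp, hc, hsp']
            constructor
            · rw [hspc]
              rw [show ((c :: hh') :: tl').filter (fun p => !p.isEmpty) = (c :: hh') :: tl'.filter (fun p => !p.isEmpty) by simp]
              rw [pvJoin_cons]
              rw [show pvNorm (c::u) = c :: pvNormIn u by simp [pvNorm, hc]]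
              rw [← ihu.2 hh' tl' hsp']
              simp
            · intro hh2 tl2 hsp2
              rw [hspc] at hsp2
              obtain ⟨e1, e2⟩ : hh2 = c :: hh' ∧ tl2 = tl' := by cases hsp2; exact ⟨rfl, rfl⟩
              rw [e1, e2]
              rw [show pvNormIn (c::u) = c :: pvNormIn u by simp [pvNormIn, hc]]
              rw [← ihu.2 hh' tl' hsp']
              simp


def pvP : Char → Bool := fun c => decide (c = '_')

def pvRstr (s : List Char) : List Char := (List.dropWhile pvP s.reverse).reverse

theorem pvNorm_nil_iff (u : List Char) : pvNorm u = [] ↔ ∀ c ∈ u, c = '_' := by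
  induction u with
  | nil => simp [pvNorm]
  | cons c t ih =>
      by_cases hc : c = '_'
      · subst hc; simp [pvNorm, ih]
      · simp [pvNorm, hc]

theorem pvS_lemma (x : List Char) : pvDd1 ('_' :: x) = '_' :: pvDd1 (List.dropWhile pvP x) := by
  induction x with
  | nil => simp [pvDd1]
  | cons c y ih =>
      by_cases hc : c = '_'
      · subst hc
        rw [show pvDd1 ('_'::'_'::y) = pvDd1 ('_'::y) by simp [pvDd1]]
        rw [ih, List.dropWhile_cons_of_pos (by simp [pvP])]
      · rw [show pvDd1 ('_'::c::y) = '_' :: pvDd1 (c::y) by simp [pvDd1, hc]]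
        rw [List.dropWhile_cons_of_neg (by simp [pvP, hc])]

theorem pvRstr_cons_ne (c : Char) (hc : c ≠ '_') (u : List Char) :
    pvRstr (c :: u) = c :: pvRstr u := by
  unfold pvRstr
  rw [show (c :: u).reverse = u.reverse ++ [c] by simp]
  rw [List.dropWhile_append]
  by_cases he : (List.dropWhile pvP u.reverse).isEmpty
  · simp at he
    simp [he, List.dropWhile_cons_of_neg (show ¬ pvP c = true by simp [pvP, hc])]
  · simp [he]

theorem pvRstr_cons_all (u : List Char) (ha : ∀ x ∈ u, x = '_') : pvRstr ('_' :: u) = [] := by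
  unfold pvRstr
  rw [show ('_' :: u).reverse = u.reverse ++ ['_'] by simp]
  rw [List.dropWhile_append]
  have he : List.dropWhile pvP u.reverse = [] := by
    rw [List.dropWhile_eq_nil_iff]
    intro x hx; simp [pvP]; exact ha x (by simpa using hx)
  simp [he, pvP]

theorem pvRstr_cons_not_all (u : List Char) (ha : ¬ ∀ x ∈ u, x = '_') :
    pvRstr ('_' :: u) = '_' :: pvRstr u := by
  unfold pvRstr
  rw [show ('_' :: u).reverse = u.reverse ++ ['_'] by simp]
  rw [List.dropWhile_append]
  have he : ¬ (List.dropWhile pvP u.reverse).isEmpty := by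
    simp only [List.isEmpty_iff, List.dropWhile_eq_nil_iff]
    intro hc
    exact ha (fun x hx => by have := hc x (by simpa using hx); simpa [pvP] using this)
  simp [he]

theorem pvC_lemma (u : List Char) :
    List.dropWhile pvP (pvRstr u) = pvRstr (List.dropWhile pvP u) := by
  induction u with
  | nil => simp [pvRstr]
  | cons c y ih =>
      by_cases hc : c = '_'
      · subst hc
        by_cases ha : ∀ x ∈ y, x = '_'
        · rw [pvRstr_cons_all y ha]
          rw [List.dropWhile_cons_of_pos (by simp [pvP])]
          rw [← ih]
          have : pvRstr y = [] := by
            unfold pvRstr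
            rw [List.dropWhile_eq_nil_iff.mpr (fun x hx => by simp [pvP]; exact ha x (by simpa using hx))]
            rfl
          simp [this]
        · rw [pvRstr_cons_not_all y ha]
          rw [List.dropWhile_cons_of_pos (by simp [pvP])]
          rw [List.dropWhile_cons_of_pos (by simp [pvP])]
          exact ih
      · rw [pvRstr_cons_ne c hc y]
        rw [List.dropWhile_cons_of_neg (by simp [pvP, hc])]
        rw [List.dropWhile_cons_of_neg (by simp [pvP, hc])]
        rw [pvRstr_cons_ne c hc y]

theorem pvKA (s : List Char) :
    pvDd1 (pvRstr s) = pvNormIn s ∧ pvNorm s = pvDd1 (pvRstr (List.dropWhile pvP s)) := by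
  suffices h : ∀ n (s : List Char), s.length ≤ n →
      pvDd1 (pvRstr s) = pvNormIn s ∧ pvNorm s = pvDd1 (pvRstr (List.dropWhile pvP s)) from
    h s.length s le_rfl
  intro n
  induction n with
  | zero =>
      intro s hs
      have : s = [] := by cases s <;> simp_all
      subst this
      simp [pvRstr, pvNormIn, pvNorm, pvDd1]
  | succ n ih =>
      intro s hs
      match s with
      | [] => simp [pvRstr, pvNormIn, pvNorm, pvDd1]
      | c :: u =>
          have hu : u.length ≤ n := by simp at hs; omega
          have ihu := ih u hu
          by_cases hc : c = '_'
          · subst hc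
            constructor
            · by_cases ha : ∀ x ∈ u, x = '_'
              · rw [pvRstr_cons_all u ha]
                rw [show pvNormIn ('_'::u) = (if pvNorm u = [] then [] else '_' :: pvNorm u) by simp [pvNormIn]]
                rw [if_pos ((pvNorm_nil_iff u).mpr ha)]
                simp [pvDd1]
              · rw [pvRstr_cons_not_all u ha]
                rw [pvS_lemma, pvC_lemma, ← ihu.2]
                rw [show pvNormIn ('_'::u) = (if pvNorm u = [] then [] else '_' :: pvNorm u) by simp [pvNormIn]]
                rw [if_neg (fun hn => ha ((pvNorm_nil_iff u).mp hn))]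
            · rw [show pvNorm ('_'::u) = pvNorm u by simp [pvNorm]]
              rw [List.dropWhile_cons_of_pos (by simp [pvP])]
              exact ihu.2
          · constructor
            · rw [pvRstr_cons_ne c hc u, pvDd1_cons_ne c hc, ihu.1]
              rw [show pvNormIn (c::u) = c :: pvNormIn u by simp only [pvNormIn]; rw [if_neg hc]]
            · rw [List.dropWhile_cons_of_neg (by simp [pvP, hc])]
              rw [pvRstr_cons_ne c hc u, pvDd1_cons_ne c hc, ihu.1]
              rw [show pvNorm (c::u) = c :: pvNormIn u by simp only [pvNorm]; rw [if_neg hc]]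

theorem pvNorm_eq_dd1_strip (s : List Char) :
    pvNorm s = pvDd1 (PySem.Chars.stripChars s ['_']) := by
  have hp : (fun c => List.contains ['_'] c) = pvP := by
    funext c; by_cases h : c = '_' <;> simp [pvP, h]
  rw [PySem.Chars.stripChars]
  rw [show (fun c => List.contains ['_'] c) = pvP from hp]
  exact (pvKA s).2

theorem pvIsIn_singleton (ch : Char) (l : List Char) :
    PySem.Chars.isIn [ch] l = l.contains ch := by
  by_cases h : ch ∈ l
  · rw [(PySem.Chars.isIn_iff_infix _ _).mpr ((List.singleton_infix_iff ch l).mpr h)]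
    simp [h]
  · rw [PySem.Chars.isIn_eq_false_iff _ _ |>.mpr (fun hc => h (hc.subset (by simp)))]
    simp [h]

-- the per-character mapping both programs agree on: keep alnum, separators → '_', drop the rest
def pvM (ch : Char) : Option Char :=
  if PySem.Chars.isalnum ch then some ch
  else if [' ', '-', '_'].contains ch then some '_' else none

theorem pvOutA_eq (l acc : List Char) :
    l.foldl (fun acc ch =>
      if PySem.Chars.isalnum ch then acc ++ [ch]
      else if [' ', '-', '_'].contains ch then acc ++ ['_'] else acc) acc
    = acc ++ l.filterMap pvM := by
  induction l generalizing acc with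
  | nil => simp
  | cons c t ih =>
      simp only [List.foldl_cons]
      by_cases h1 : PySem.Chars.isalnum c = true
      · have hm : pvM c = some c := by simp only [pvM]; rw [if_pos h1]
        rw [show List.filterMap pvM (c::t) = c :: List.filterMap pvM t by
          rw [List.filterMap_cons, hm]]
        rw [if_pos h1, ih]
        simp
      · by_cases h2 : [' ', '-', '_'].contains c = true
        · have hm : pvM c = some '_' := by simp only [pvM]; rw [if_neg h1, if_pos h2]
          rw [show List.filterMap pvM (c::t) = '_' :: List.filterMap pvM t by
            rw [List.filterMap_cons, hm]]
          rw [if_neg h1, if_pos h2, ih]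
          simp
        · have hm : pvM c = none := by simp only [pvM]; rw [if_neg h1, if_neg h2]
          rw [show List.filterMap pvM (c::t) = List.filterMap pvM t by
            rw [List.filterMap_cons, hm]]
          rw [if_neg h1, if_neg h2, ih]

-- B's step on an already-mapped character
def pvG (st : List (List Char) × List Char) (c : Char) : List (List Char) × List Char :=
  if c = '_' then (if st.2 ≠ [] then (st.1 ++ [st.2], ([] : List Char)) else st)
  else (st.1, st.2 ++ [c])

theorem pvStepB_eq_g (l : List Char) (st : List (List Char) × List Char) :
    l.foldl pvStepB st = (l.filterMap pvM).foldl pvG st := by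
  induction l generalizing st with
  | nil => simp
  | cons c t ih =>
      by_cases h1 : PySem.Chars.isalnum c = true
      · have hne : c ≠ '_' := by
          rintro rfl
          have hund : PySem.Chars.isalnum '_' = false := by decide
          rw [hund] at h1; exact absurd h1 (by simp)
        have hm : pvM c = some c := by simp only [pvM]; rw [if_pos h1]
        rw [show List.filterMap pvM (c::t) = c :: List.filterMap pvM t by
          rw [List.filterMap_cons, hm]]
        rw [List.foldl_cons, List.foldl_cons]
        rw [show pvStepB st c = (st.1, st.2 ++ [c]) by simp [pvStepB, h1]]
        rw [show pvG st c = (st.1, st.2 ++ [c]) by simp [pvG, hne]]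
        exact ih _
      · by_cases h2 : [' ', '-', '_'].contains c = true
        · have h2' : PySem.Chars.isIn [c] [' ', '-', '_'] = true := by
            rw [pvIsIn_singleton]; exact h2
          have hm : pvM c = some '_' := by simp only [pvM]; rw [if_neg h1, if_pos h2]
          rw [show List.filterMap pvM (c::t) = '_' :: List.filterMap pvM t by
            rw [List.filterMap_cons, hm]]
          rw [List.foldl_cons, List.foldl_cons]
          rw [show pvStepB st c = (if st.2 ≠ [] then (st.1 ++ [st.2], ([] : List Char)) else st) by
            simp [pvStepB, h1, h2']]
          rw [show pvG st '_' = (if st.2 ≠ [] then (st.1 ++ [st.2], ([] : List Char)) else st) by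
            simp [pvG]]
          exact ih _
        · have h2' : PySem.Chars.isIn [c] [' ', '-', '_'] = false := by
            rw [pvIsIn_singleton]; simpa using h2
          have hm : pvM c = none := by simp only [pvM]; rw [if_neg h1, if_neg h2]
          rw [show List.filterMap pvM (c::t) = List.filterMap pvM t by
            rw [List.filterMap_cons, hm]]
          rw [List.foldl_cons]
          rw [show pvStepB st c = st by simp [pvStepB, h1, h2']]
          exact ih _

theorem pvG_acc (m : List Char) : ∀ (ps : List (List Char)) (cur : List Char),
    m.foldl pvG (ps, cur) = (ps ++ (m.foldl pvG ([], cur)).1, (m.foldl pvG ([], cur)).2) := by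
  induction m with
  | nil => intro ps cur; simp
  | cons c t ih =>
      intro ps cur
      by_cases hc : c = '_'
      · subst hc
        by_cases hcur : cur = []
        · subst hcur
          simp only [List.foldl_cons, pvG, if_true]
          simp [ih ps []]
        · simp only [List.foldl_cons]
          rw [show pvG (ps, cur) '_' = (ps ++ [cur], []) by simp [pvG, hcur]]
          rw [show pvG (([] : List (List Char)), cur) '_' = ([cur], []) by simp [pvG, hcur]]
          rw [ih (ps ++ [cur]) [], ih [cur] []]
          simp
  
      · simp only [List.foldl_cons]
        rw [show pvG (ps, cur) c = (ps, cur ++ [c]) by simp [pvG, hc]]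
        rw [show pvG (([] : List (List Char)), cur) c = ([], cur ++ [c]) by simp [pvG, hc]]
        exact ih ps (cur ++ [c])

-- finalisation: flush the last run
def pvFin (st : List (List Char) × List Char) : List (List Char) :=
  if st.2 ≠ [] then st.1 ++ [st.2] else st.1

-- B's run extraction produces exactly the nonempty pieces of the '_'-split
theorem pvRuns_eq_sp (m : List Char) : ∀ (cur : List Char),
    pvFin (m.foldl pvG ([], cur))
      = ((pvSp m).modifyHead (cur ++ ·)).filter (fun p => !p.isEmpty) := by
  induction m with
  | nil =>
      intro cur
      by_cases hcur : cur = [] <;> simp [pvFin, pvSp, List.modifyHead, hcur]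
  | cons c t ih =>
      intro cur
      obtain ⟨hh, tl, hsp⟩ : ∃ hh tl, pvSp t = hh :: tl := by
        cases h : pvSp t with
        | nil => exact absurd h (pvSp_ne_nil t)
        | cons a l => exact ⟨a, l, rfl⟩
      by_cases hc : c = '_'
      · subst hc
        by_cases hcur : cur = []
        · subst hcur
          simp only [List.foldl_cons]
          rw [show pvG (([] : List (List Char)), ([] : List Char)) '_' = ([], []) by simp [pvG]]
          rw [ih [], show pvSp ('_'::t) = [] :: pvSp t by simp [pvSp], hsp]
          simp [List.modifyHead]
        · simp only [List.foldl_cons]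
          rw [show pvG (([] : List (List Char)), cur) '_' = ([cur], []) by simp [pvG, hcur]]
          rw [pvG_acc t [cur] []]
          rw [show pvFin ([cur] ++ (t.foldl pvG ([], [])).1, (t.foldl pvG ([], [])).2)
              = cur :: pvFin (t.foldl pvG ([], [])) by
            by_cases h2 : (t.foldl pvG ([], [])).2 = [] <;> simp [pvFin, h2]]
          rw [ih []]
          rw [show pvSp ('_'::t) = [] :: pvSp t by simp [pvSp]]
          simp only [List.modifyHead, List.nil_append, List.append_nil]
          rw [show ((cur :: pvSp t).filter (fun p => !p.isEmpty))
              = cur :: (pvSp t).filter (fun p => !p.isEmpty) by simp [hcur]]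
          rw [hsp]
      · simp only [List.foldl_cons]
        rw [show pvG (([] : List (List Char)), cur) c = ([], cur ++ [c]) by simp [pvG, hc]]
        rw [ih (cur ++ [c])]
        rw [show pvSp (c::t) = (pvSp t).modifyHead (c :: ·) by simp [pvSp, hc]]
        rw [hsp]
        simp [List.modifyHead]

-- the two slug computations agree (A's pipeline vs B's run collector)
theorem pvMain (L : List Char) :
    pvLoopA (PySem.Chars.stripChars
      (L.foldl (fun acc ch =>
        if PySem.Chars.isalnum ch then acc ++ [ch]
        else if [' ', '-', '_'].contains ch then acc ++ ['_'] else acc) []) ['_'])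
    = PySem.Chars.join ['_']
        (if (L.foldl pvStepB ([], [])).2 ≠ [] then
          (L.foldl pvStepB ([], [])).1 ++ [(L.foldl pvStepB ([], [])).2]
         else (L.foldl pvStepB ([], [])).1) := by
  rw [pvOutA_eq, List.nil_append, pvLoopA_eq_dd1, ← pvNorm_eq_dd1_strip, ← pvG_eq_norm,
      pvStepB_eq_g]
  rw [show (if ((L.filterMap pvM).foldl pvG ([], [])).2 ≠ [] then
        ((L.filterMap pvM).foldl pvG ([], [])).1 ++ [((L.filterMap pvM).foldl pvG ([], [])).2]
       else ((L.filterMap pvM).foldl pvG ([], [])).1)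
      = pvFin ((L.filterMap pvM).foldl pvG ([], [])) from rfl]
  rw [pvRuns_eq_sp _ []]
  congr 1
  cases h : pvSp (L.filterMap pvM) <;> simp [List.modifyHead]

-- ===== VERDICT (by name: the statement is the Claim_ definition above) =====
theorem channel_name_from_filename_py_spec : Claim_equal_channel_name_from_filename_py := by
  intro filename kind _
  unfold Spec_channel_name_from_filename_py
  simp only [channel_name_from_filename_py, channel_name_from_filename_py_alt]
  rw [pvMain]
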